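-- pv_equiv track=rewrite | github.com/aiwithqasim/PIAIC-Artificial-Intelligence | Q1/batch1/assignment/labs109.py | seven_zero
-- ===== SOURCE A (Python) =====
-- def seven_zero(n):
--     d = 1
--     ans = 0
--     while True:
--         if n%2 == 0 or n%5 == 0:
--             k = 1
--             while k <= d:
--                 val = int(k * '7' + (d-k) * '0')
--                 if val%n == 0:
--                     ans = val
--                     break
--                 k += 1
--         else:
--             val = int(d * '7')
--             ans = val if val%n == 0 else 0
--         d += 1
--         if ans > 0:
--              return ans
--              break
-- ===== SOURCE B (Python) =====
-- def seven_zero(n):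
--     # Incremental modular arithmetic: track remainders of 7...7 blocks and powers of 10
--     # mod n instead of rebuilding and dividing big integers; the big result is built once.
--     sev = [0]       # sev[k] = int('7' * k) % n
--     pw = [1 % n]    # pw[z] = (10 ** z) % n
--     d = 0
--     while True:
--         d += 1
--         sev.append((sev[-1] * 10 + 7) % n)
--         pw.append(pw[-1] * 10 % n)
--         ks = range(1, d + 1) if n % 2 == 0 or n % 5 == 0 else range(d, d + 1)
--         for k in ks:
--             if sev[k] * pw[d - k] % n == 0:
--                 return 7 * (10 ** k - 1) // 9 * 10 ** (d - k)
-- ===== Notes on version B (the rewrite author's own statement) =====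
-- stated objective: faster
-- what changed: A rebuilds a d-digit big integer from a string for every candidate and divides it by n; B tracks the remainders of the seven-blocks and powers of ten mod n incrementally with O(1)-size integer steps per candidate and builds the big result only once, for the returned hit.
import Mathlib
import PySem

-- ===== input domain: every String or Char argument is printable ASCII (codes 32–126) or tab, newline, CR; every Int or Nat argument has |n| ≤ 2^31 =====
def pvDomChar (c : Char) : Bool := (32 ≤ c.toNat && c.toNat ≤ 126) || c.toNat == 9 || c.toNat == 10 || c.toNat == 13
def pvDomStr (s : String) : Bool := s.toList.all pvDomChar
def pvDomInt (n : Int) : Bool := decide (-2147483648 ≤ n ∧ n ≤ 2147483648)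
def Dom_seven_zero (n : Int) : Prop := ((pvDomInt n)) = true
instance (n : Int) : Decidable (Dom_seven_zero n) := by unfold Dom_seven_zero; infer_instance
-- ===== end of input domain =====

-- B replaces A's per-candidate big-integer string building and big-int divisibility tests by
-- incremental modular remainder tracking (small ints), building the big result once at the end.

-- ===== PORT A =====
-- int(s): ported by hand as a digit fold, exact for the nonempty '0'-'9'-only strings built
-- here (no sign/whitespace/underscore); PySem.Int.ofStr? computes the same value on these
-- strings but its parser is a private definition, opaque to the equivalence proof.
def pyIntDigits (cs : List Char) : Int :=
  cs.foldl (fun a c => a * 10 + ((c.toNat - '0'.toNat : Nat) : Int)) 0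

-- inner `while k <= d` loop of A: first value int(k*'7' + (d-k)*'0') divisible by n, else 0 (= ans untouched)
def sevenZeroTry (n : Int) (d k : Nat) : Int :=
  if _h : k ≤ d then
    let val := pyIntDigits (List.replicate k '7' ++ List.replicate (d - k) '0')
    if PySem.Int.mod val n = 0 then val else sevenZeroTry n d (k + 1)
  else 0
termination_by d + 1 - k

-- `while True` loop of A, d counting up; a fuel parameter keeps the recursion structural
-- (the loop exits far earlier on every input Pre_ admits; 0 is returned only on fuel exhaustion)
def sevenZeroLoop (n : Int) (d : Nat) : Nat → Int
  | 0 => 0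
  | fuel + 1 =>
    let ans : Int :=
      if PySem.Int.mod n 2 = 0 ∨ PySem.Int.mod n 5 = 0 then
        sevenZeroTry n d 1
      else
        let val := pyIntDigits (List.replicate d '7')
        if PySem.Int.mod val n = 0 then val else 0
    if 0 < ans then ans else sevenZeroLoop n (d + 1) fuel

def seven_zero (n : Int) : Int := sevenZeroLoop n 1 1099511627776

-- ===== PORT B =====
-- `for k in ks` loop of B: scan candidate k values, remainder test on tracked residues,
-- big value 7 * (10**k - 1) // 9 * 10**(d-k) built only for the returned hit
def sevenScan (n : Int) (sev pw : List Int) (d : Int) : List Int → Option Int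
  | [] => none
  | k :: ks =>
    if PySem.Int.mod (PySem.List.pyGetD sev k 0 * PySem.List.pyGetD pw (d - k) 0) n = 0 then
      some (PySem.Int.floordiv (7 * (10 ^ k.toNat - 1)) 9 * 10 ^ (d - k).toNat)
    else sevenScan n sev pw d ks

-- `while True` loop of B: extend the remainder tables, scan, recurse (same fuel discipline as A's port)
def sevenZeroAltLoop (n : Int) (sev pw : List Int) (d : Nat) : Nat → Int
  | 0 => 0
  | fuel + 1 =>
    let d' := d + 1
    let sev' := sev ++ [PySem.Int.mod (PySem.List.pyGetD sev (-1) 0 * 10 + 7) n]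
    let pw' := pw ++ [PySem.Int.mod (PySem.List.pyGetD pw (-1) 0 * 10) n]
    let ks := if PySem.Int.mod n 2 = 0 ∨ PySem.Int.mod n 5 = 0 then
        PySem.List.pyRange 1 ((d' : Int) + 1) 1
      else PySem.List.pyRange (d' : Int) ((d' : Int) + 1) 1
    match sevenScan n sev' pw' (d' : Int) ks with
    | some v => v
    | none => sevenZeroAltLoop n sev' pw' d' fuel

def seven_zero_alt (n : Int) : Int :=
  sevenZeroAltLoop n [0] [PySem.Int.mod 1 n] 0 1099511627776

-- ===== PRECONDITION & SPEC =====
-- Pre_ excludes n = 0, on which A raises ZeroDivisionError, and the n whose smallest multiple of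
-- the form 7...70...0 (k sevens then z zeros, value 7*(10^k-1)/9*10^z) has more than 4300 digits,
-- on which A raises ValueError (CPython's default 4300-digit str->int conversion limit) instead of
-- returning; on every other int of the domain A returns normally.
def Pre_seven_zero (n : Int) : Prop :=
  n ≠ 0 ∧ ∃ z ∈ List.range' 0 4301, ∃ k ∈ List.range' 1 (4300 - z), n ∣ 7 * ((10 ^ k - 1) / 9) * 10 ^ z

instance (n : Int) : Decidable (Pre_seven_zero n) := by unfold Pre_seven_zero; infer_instance

def pvWitness_seven_zero : Int := 7

def Spec_seven_zero (n : Int) (out : Int) : Prop := out = seven_zero_alt n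
instance (n : Int) (out : Int) : Decidable (Spec_seven_zero n out) := by
  unfold Spec_seven_zero; infer_instance

-- ===== CLAIM (what is proved, stated in full; the proofs are below) =====
def Claim_equal_seven_zero : Prop :=
  ∀ (n : Int), Dom_seven_zero n → Pre_seven_zero n → Spec_seven_zero n (seven_zero n)

-- ===== LEMMAS AND PROOFS =====

-- rep7 k = int('7' * k), the number written with k sevens
def rep7 : Nat → Int
  | 0 => 0
  | k + 1 => rep7 k * 10 + 7

-- the remainder tables B maintains: sevL n d = [int('7'*k) % n for k in 0..d], pwL n d = [10^z % n for z in 0..d]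
def sevL (n : Int) (d : Nat) : List Int :=
  (List.range (d + 1)).map (fun k => PySem.Int.mod (rep7 k) n)
def pwL (n : Int) (d : Nat) : List Int :=
  (List.range (d + 1)).map (fun z => PySem.Int.mod (10 ^ z) n)

theorem rep7_nonneg (k : Nat) : 0 ≤ rep7 k := by
  induction k with
  | zero => simp [rep7]
  | succ k ih => simp only [rep7]; omega

theorem rep7_pos (k : Nat) (h : 1 ≤ k) : 0 < rep7 k := by
  cases k with
  | zero => omega
  | succ k => have := rep7_nonneg k; simp only [rep7]; omega

theorem nine_mul_rep7 (k : Nat) : 9 * rep7 k = 7 * (10 ^ k - 1) := by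
  induction k with
  | zero => simp [rep7]
  | succ k ih => simp only [rep7, pow_succ]; ring_nf; ring_nf at ih; omega

theorem rep7_succ' (k : Nat) : rep7 (k + 1) = 7 * 10 ^ k + rep7 k := by
  have h9 := nine_mul_rep7 k
  have h9' := nine_mul_rep7 (k + 1)
  have hp : (10:Int) ^ (k+1) = 10 ^ k * 10 := pow_succ 10 k
  omega

theorem ediv_rep7 (k : Nat) : 7 * (10 ^ k - 1) / 9 = rep7 k := by
  rw [← nine_mul_rep7]
  exact Int.mul_ediv_cancel_left _ (by norm_num)

theorem foldl_zeros (z : Nat) (a : Int) :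
    List.foldl (fun a c => a * 10 + ((c.toNat - '0'.toNat : Nat) : Int)) a (List.replicate z '0') =
      a * 10 ^ z := by
  induction z generalizing a with
  | zero => simp
  | succ z ih =>
    rw [List.replicate_succ, List.foldl_cons, ih]
    have : ((('0'.toNat - '0'.toNat : Nat)) : Int) = 0 := by decide
    rw [this, pow_succ]; ring

theorem foldl_sevens (k : Nat) (a : Int) :
    List.foldl (fun a c => a * 10 + ((c.toNat - '0'.toNat : Nat) : Int)) a (List.replicate k '7') =
      a * 10 ^ k + rep7 k := by
  induction k generalizing a with
  | zero => simp [rep7]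
  | succ k ih =>
    rw [List.replicate_succ, List.foldl_cons, ih]
    have : ((('7'.toNat - '0'.toNat : Nat)) : Int) = 7 := by decide
    rw [this, rep7_succ', pow_succ]; ring

theorem pyIntDigits_spec (k z : Nat) :
    pyIntDigits (List.replicate k '7' ++ List.replicate z '0') = rep7 k * 10 ^ z := by
  rw [pyIntDigits, List.foldl_append, foldl_sevens, foldl_zeros]
  simp

-- PySem.Int.mod is floor-mod (Int.fmod): congruence under adding a multiple of n
theorem mod_add_mul (a t n : Int) : PySem.Int.mod (a + n * t) n = PySem.Int.mod a n := by
  show (a + n * t).fmod n = a.fmod n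
  exact Int.add_mul_fmod_self_left a n t

theorem mod_sub_dvd (a n : Int) : n ∣ a - PySem.Int.mod a n := by
  show n ∣ a - a.fmod n
  rw [Int.fmod_def]
  exact ⟨a.fdiv n, by ring⟩

-- the remainder test on tracked residues equals the big-int divisibility test
theorem mod_mul_test (a b n : Int) :
    (PySem.Int.mod (PySem.Int.mod a n * PySem.Int.mod b n) n = 0) ↔
      (PySem.Int.mod (a * b) n = 0) := by
  rw [PySem.Int.mod_eq_zero_iff_dvd, PySem.Int.mod_eq_zero_iff_dvd]
  obtain ⟨s, hs⟩ := mod_sub_dvd a n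
  obtain ⟨t, ht⟩ := mod_sub_dvd b n
  have ha : PySem.Int.mod a n = a - n * s := by omega
  have hb : PySem.Int.mod b n = b - n * t := by omega
  rw [ha, hb]
  constructor
  · rintro ⟨c, hc⟩
    exact ⟨c + s * b + t * a - n * s * t, by linear_combination hc⟩
  · rintro ⟨c, hc⟩
    exact ⟨c - s * b - t * a + n * s * t, by linear_combination hc⟩

theorem sevL_get (n : Int) (d k : Nat) (h : k ≤ d) :
    PySem.List.pyGetD (sevL n d) (k : Int) 0 = PySem.Int.mod (rep7 k) n := by
  rw [PySem.List.pyGetD_natCast, sevL]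
  rw [List.getD_eq_getElem _ _ (by simp; omega)]
  simp

theorem pwL_get (n : Int) (d z : Nat) (h : z ≤ d) :
    PySem.List.pyGetD (pwL n d) (z : Int) 0 = PySem.Int.mod (10 ^ z) n := by
  rw [PySem.List.pyGetD_natCast, pwL]
  rw [List.getD_eq_getElem _ _ (by simp; omega)]
  simp

theorem sevL_succ (n : Int) (d : Nat) :
    sevL n (d + 1) = sevL n d ++ [PySem.Int.mod (rep7 (d + 1)) n] := by
  rw [sevL, sevL, List.range_succ, List.map_append]; rfl

theorem pwL_succ (n : Int) (d : Nat) :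
    pwL n (d + 1) = pwL n d ++ [PySem.Int.mod (10 ^ (d + 1)) n] := by
  rw [pwL, pwL, List.range_succ, List.map_append]; rfl

theorem sevL_update (n : Int) (d : Nat) :
    sevL n d ++ [PySem.Int.mod (PySem.List.pyGetD (sevL n d) (-1) 0 * 10 + 7) n] =
      sevL n (d + 1) := by
  rw [sevL_succ]
  congr 2
  have hlast : PySem.List.pyGetD (sevL n d) (-1) 0 = PySem.Int.mod (rep7 d) n := by
    cases d with
    | zero => rfl
    | succ d => rw [sevL_succ, PySem.List.pyGetD_neg_one_append_singleton]
  rw [hlast]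
  obtain ⟨s, hs⟩ := mod_sub_dvd (rep7 d) n
  have hm : PySem.Int.mod (rep7 d) n = rep7 d - n * s := by omega
  rw [hm]
  have : (rep7 d - n * s) * 10 + 7 = (rep7 d * 10 + 7) + n * (-10 * s) := by ring
  rw [this, mod_add_mul]
  rfl

theorem pwL_update (n : Int) (d : Nat) :
    pwL n d ++ [PySem.Int.mod (PySem.List.pyGetD (pwL n d) (-1) 0 * 10) n] =
      pwL n (d + 1) := by
  rw [pwL_succ]
  congr 2
  have hlast : PySem.List.pyGetD (pwL n d) (-1) 0 = PySem.Int.mod (10 ^ d) n := by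
    cases d with
    | zero => rfl
    | succ d => rw [pwL_succ, PySem.List.pyGetD_neg_one_append_singleton]
  rw [hlast]
  obtain ⟨s, hs⟩ := mod_sub_dvd ((10:Int) ^ d) n
  have hm : PySem.Int.mod ((10:Int) ^ d) n = 10 ^ d - n * s := by omega
  rw [hm]
  have : ((10:Int) ^ d - n * s) * 10 = 10 ^ (d + 1) + n * (-10 * s) := by rw [pow_succ]; ring
  rw [this, mod_add_mul]

-- the heart: B's scan over range(k, d+1) returns exactly A's inner-loop result (as an Option)
theorem scan_eq (n : Int) (d : Nat) :
    ∀ m k : Nat, d + 1 - k = m → 1 ≤ k →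
    sevenScan n (sevL n d) (pwL n d) (d : Int) (PySem.List.pyRange (k : Int) ((d : Int) + 1) 1) =
      if 0 < sevenZeroTry n d k then some (sevenZeroTry n d k) else none := by
  intro m
  induction m with
  | zero =>
    intro k hm hk
    have hkd : d < k := by omega
    rw [PySem.List.pyRange_one_eq_nil (by exact_mod_cast hkd)]
    rw [sevenZeroTry]
    simp [Nat.not_le.mpr hkd]
    rfl
  | succ m ih =>
    intro k hm hk
    have hkd : k ≤ d := by omega
    rw [PySem.List.pyRange_one_cons (by exact_mod_cast Nat.lt_succ_of_le hkd)]
    rw [sevenScan]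
    rw [sevL_get n d k hkd]
    have hsub : (d : Int) - (k : Int) = ((d - k : Nat) : Int) := by omega
    rw [hsub, pwL_get n d (d - k) (by omega)]
    simp only [mod_mul_test]
    rw [sevenZeroTry]
    rw [dif_pos hkd]
    simp only [pyIntDigits_spec k (d - k)]
    by_cases htest : PySem.Int.mod (rep7 k * 10 ^ (d - k)) n = 0
    · rw [if_pos htest, if_pos htest]
      have hpos : 0 < rep7 k * 10 ^ (d - k) := mul_pos (rep7_pos k hk) (by positivity)
      rw [if_pos hpos]
      simp [Int.toNat_natCast, ediv_rep7]
    · rw [if_neg htest, if_neg htest]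
      have hcast : ((k : Int) + 1) = ((k + 1 : Nat) : Int) := by omega
      rw [hcast, ih (k + 1) (by omega) (by omega)]

-- in the coprime branch A tests only the all-sevens candidate; that equals the inner loop started at k = d
theorem try_at_d (n : Int) (d : Nat) :
    sevenZeroTry n d d =
      (if PySem.Int.mod (pyIntDigits (List.replicate d '7')) n = 0 then
        pyIntDigits (List.replicate d '7') else 0) := by
  rw [sevenZeroTry, dif_pos (le_refl d)]
  simp only [Nat.sub_self, List.replicate_zero, List.append_nil]
  split_ifs with h
  · rfl
  · rw [sevenZeroTry, dif_neg (by omega)]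

-- lockstep equivalence of the two outer loops
theorem loop_eq (n : Int) :
    ∀ (fuel d : Nat),
      sevenZeroAltLoop n (sevL n d) (pwL n d) d fuel = sevenZeroLoop n (d + 1) fuel := by
  intro fuel
  induction fuel with
  | zero => intro d; rfl
  | succ fuel ih =>
    intro d
    rw [sevenZeroAltLoop, sevenZeroLoop]
    simp only [sevL_update, pwL_update]
    by_cases hc : PySem.Int.mod n 2 = 0 ∨ PySem.Int.mod n 5 = 0
    · rw [if_pos hc, if_pos hc]
      have h1 : (1 : Int) = ((1 : Nat) : Int) := by norm_num
      have hup : ((d + 1 : Nat) : Int) + 1 = ((d : Int) + 1) + 1 := by push_cast; ring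
      rw [show PySem.List.pyRange 1 (((d + 1 : Nat) : Int) + 1) 1
            = PySem.List.pyRange (((1 : Nat) : Int)) (((d + 1 : Nat) : Int) + 1) 1 by norm_num]
      rw [scan_eq n (d + 1) (d + 1) 1 (by omega) (by omega)]
      split_ifs with hpos
      · rfl
      · exact ih (d + 1)
    · rw [if_neg hc, if_neg hc]
      rw [show PySem.List.pyRange ((d + 1 : Nat) : Int) (((d + 1 : Nat) : Int) + 1) 1
            = PySem.List.pyRange (((d + 1 : Nat) : Int)) (((d + 1 : Nat) : Int) + 1) 1 by rfl]
      rw [scan_eq n (d + 1) 1 (d + 1) (by omega) (by omega)]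
      rw [try_at_d n (d + 1)]
      by_cases htest : PySem.Int.mod (pyIntDigits (List.replicate (d + 1) '7')) n = 0
      · have hv : 0 < pyIntDigits (List.replicate (d + 1) '7') := by
          have hpd : pyIntDigits (List.replicate (d + 1) '7') = rep7 (d + 1) * 10 ^ 0 := by
            rw [← pyIntDigits_spec (d + 1) 0]; simp
          rw [hpd]
          simpa using rep7_pos (d + 1) (by omega)
        simp only [if_pos htest]
        rw [if_pos hv, if_pos hv]
      · simp only [if_neg htest]
        norm_num
        exact ih (d + 1)
-- ===== VERDICT (by name: the statement is the Claim_ definition above) =====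
theorem seven_zero_spec : Claim_equal_seven_zero := by
  intro n _hdom _hpre
  unfold Spec_seven_zero seven_zero seven_zero_alt
  have h0 : sevL n 0 = [0] := by
    simp [sevL, rep7]
    rfl
  have h1 : pwL n 0 = [PySem.Int.mod 1 n] := by
    simp [pwL]
  rw [← h0, ← h1, loop_eq n]
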